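-- pv_equiv track=rewrite | github.com/parkcoool/Algorithm | 프로그래머스/2/42860. 조이스틱/조이스틱.py | solution
-- ===== SOURCE A (Python) =====
-- def solution(name):
--     ans = 0
--     wrongs = list(filter(lambda i: name[i] != "A", range(len(name))))
--
--     for wrong in wrongs:
--         ord1 = ord("A")
--         ord2 = ord(name[wrong])
--         ans += min(abs(ord2 - ord1), ord("Z") + 1 - ord2)
--
--     if len(wrongs) > 1:
--         shortest_dist = wrongs[-1]
--         for index in range(len(wrongs) - 1):
--             dist1 = wrongs[index]
--             dist2 = len(name) - wrongs[index + 1]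
--             dist = dist1 + dist2 + min(dist1, dist2)
--             shortest_dist = min(dist, shortest_dist)
--         ans += shortest_dist
--
--     elif len(wrongs) == 1:
--         ans += min(wrongs[0], len(name) - wrongs[0])
--
--     return ans
-- ===== SOURCE B (Python) =====
-- def solution(name):
--     n = len(name)
--     total = 0
--     for c in name:
--         o = ord(c)
--         total += min(abs(o - 65), 91 - o)
--     best = 3 * n
--     for i in range(n):
--         nxt = i + 1
--         while nxt < n and name[nxt] == "A":
--             nxt += 1
--         best = min(best, i + (n - nxt) + min(i, n - nxt))
--     return total + best
-- ===== Notes on version B (the rewrite author's own statement) =====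
-- stated objective: alternative
-- what changed: A filters out the list of wrong-letter indices and minimizes a split-travel formula over adjacent pairs of that list (with separate 0/1-wrong cases); B never builds that list: it scans every cursor position i, advances an inner while-loop past consecutive 'A's to find the next wrong letter, and minimizes i+(n-nxt)+min(i,n-nxt) over all i, which also covers the go-left-first sweep A misses.
-- intended difference: On names with at least two non-'A' letters where sweeping left first (cost n - first_wrong) is strictly cheaper than every right-first sweep candidate, A returns that larger right-first minimum (e.g. 5 on 'AABB') while B returns the smaller true cost (4 on 'AABB'), which is the intended minimum number of joystick moves. — e.g. on solution("AABB"): A returns 5, B returns 4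
import Mathlib
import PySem

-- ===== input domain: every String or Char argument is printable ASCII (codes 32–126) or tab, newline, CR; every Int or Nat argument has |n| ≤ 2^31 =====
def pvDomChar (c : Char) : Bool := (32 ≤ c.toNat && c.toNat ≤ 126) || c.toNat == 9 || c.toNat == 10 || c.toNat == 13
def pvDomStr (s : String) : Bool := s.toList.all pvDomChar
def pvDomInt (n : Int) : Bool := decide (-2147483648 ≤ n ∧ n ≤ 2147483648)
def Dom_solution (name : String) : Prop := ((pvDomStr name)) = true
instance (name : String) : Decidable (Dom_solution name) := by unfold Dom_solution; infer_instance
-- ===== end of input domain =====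

-- B drops A's wrong-index list and its adjacent-pair loop entirely: it scans every
-- cursor position i, advances an inner while-loop past consecutive 'A's to the next
-- wrong letter, and minimizes the sweep cost i+(n-nxt)+min(i,n-nxt) over all i.
-- On a small region D_solution (leading-'A' names where sweeping left first is strictly
-- cheapest) A misses that sweep and returns a larger value; B returns the intended minimum.

-- ===== PORT A =====
-- literal transliteration of A; name[i] is ported as pyGetD with default 'A'
-- (every index A uses is in range, so the default is never consulted)
def solution (name : String) : Int :=
  let cs := name.toList
  let n : Int := PySem.Chars.len cs
  let wrongs : List Int :=
    (PySem.List.pyRange 0 n 1).filter (fun i => decide (PySem.List.pyGetD cs i 'A' ≠ 'A'))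
  let ans : Int := wrongs.foldl (fun ans wrong =>
    let ord1 : Int := 65
    let ord2 : Int := ((PySem.List.pyGetD cs wrong 'A').toNat : Int)
    ans + min |ord2 - ord1| (90 + 1 - ord2)) 0
  if wrongs.length > 1 then
    let shortest :=
      (PySem.List.pyRange 0 ((wrongs.length : Int) - 1) 1).foldl (fun sd index =>
        let dist1 := PySem.List.pyGetD wrongs index 0
        let dist2 := n - PySem.List.pyGetD wrongs (index + 1) 0
        let dist := dist1 + dist2 + min dist1 dist2
        min dist sd)
      (PySem.List.pyGetD wrongs (-1) 0)
    ans + shortest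
  else if wrongs.length == 1 then
    ans + min (PySem.List.pyGetD wrongs 0 0) (n - PySem.List.pyGetD wrongs 0 0)
  else ans

-- ===== PORT B =====
-- the inner while-loop of Source B: advance nxt past consecutive 'A's (exact port:
-- the character is only read when nxt < len, as in Python's short-circuit `and`)
def nxtGo (cs : List Char) : Nat → Nat → Nat
  | 0, nxt => nxt
  | fuel + 1, nxt =>
    if nxt < cs.length then
      (if cs.getD nxt 'A' = 'A' then nxtGo cs fuel (nxt + 1) else nxt)
    else nxt

def nxtLoop (cs : List Char) (nxt : Nat) : Nat := nxtGo cs (cs.length - nxt) nxt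

-- one candidate of Source B's outer loop: i + (n - nxt) + min(i, n - nxt)
def fCand (cs : List Char) (i : Nat) : Int :=
  let n : Int := (cs.length : Int)
  let nxt : Int := (nxtLoop cs (i + 1) : Int)
  (i : Int) + (n - nxt) + min (i : Int) (n - nxt)

def solution_alt (name : String) : Int :=
  let cs := name.toList
  let n : Int := (cs.length : Int)
  let total : Int := cs.foldl (fun a c =>
    let o : Int := (c.toNat : Int)
    a + min |o - 65| (91 - o)) 0
  let best : Int := (List.range cs.length).foldl (fun b i => min b (fCand cs i)) (3 * n)
  total + best

-- ===== PRECONDITION & SPEC =====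
-- On names with ≥ 2 non-'A' letters where the go-left-first sweep (cost n - first_wrong)
-- is strictly cheaper than every right-first sweep p + (n - q) + min(p, n - q) over a
-- wrong position p followed by no wrong position before q, A returns the larger
-- right-first minimum while B returns the smaller true joystick cost, which is the
-- intended minimum number of moves (e.g. "AABB": A gives 5, B gives 4).
def D_solution (name : String) : Prop :=
  let cs := name.toList
  let m := cs.length
  cs.getD 0 'A' = 'A' ∧
  2 ≤ cs.countP (fun c => c != 'A') ∧
  ∀ p < m, ∀ q ≤ m,
    (p < q ∧ cs.getD p 'A' ≠ 'A' ∧ ∀ t < q, p < t → cs.getD t 'A' = 'A') →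
    m - cs.findIdx (fun c => c != 'A') < p + (m - q) + min p (m - q)
instance (name : String) : Decidable (D_solution name) := by unfold D_solution; infer_instance

def Spec_solution (name : String) (out : Int) : Prop := ¬ D_solution name → out = solution_alt name
instance (name : String) (out : Int) : Decidable (Spec_solution name out) := by unfold Spec_solution; infer_instance

def pvDiffWitness_solution : String := "AABB"
def pvDiffWitnessOut_solution : Int × Int := (5, 4)

-- ===== CLAIM (what is proved, stated in full; the proofs are below) =====
def Claim_unchanged_solution : Prop := ∀ (name : String), Dom_solution name → Spec_solution name (solution name)
def Claim_changed_solution : Prop := Dom_solution (pvDiffWitness_solution) ∧ D_solution (pvDiffWitness_solution) ∧ solution (pvDiffWitness_solution) = pvDiffWitnessOut_solution.1 ∧ solution_alt (pvDiffWitness_solution) = pvDiffWitnessOut_solution.2 ∧ pvDiffWitnessOut_solution.1 ≠ pvDiffWitnessOut_solution.2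
def Claim_exact_solution : Prop := ∀ (name : String), Dom_solution name → D_solution name → solution name ≠ solution_alt name

-- ===== LEMMAS AND PROOFS =====

-- the list of wrong-letter positions (proof layer only)
def wrongsN (cs : List Char) : List Nat :=
  (List.range cs.length).filter (fun i => cs.getD i 'A' ≠ 'A')

-- vertical cost of one character
def vc (c : Char) : Int := min |(c.toNat : Int) - 65| (91 - (c.toNat : Int))

-- the list of wrong indices of A's port, expressed over the enumeration
def wIdx (cs : List Char) : List Int :=
  ((PySem.List.enumerate cs 0).filter (fun q => decide (q.2 ≠ 'A'))).map (·.1)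

-- horizontal candidates of adjacent wrong pairs (A's second loop, structurally)
def pcf (n : Int) (w : Int) : List Int → List Int
  | [] => []
  | x :: xs => (w + (n - x) + min w (n - x)) :: pcf n x xs

def lastD (l : List Int) (d : Int) : Int := l.getLast?.getD d

theorem wIdx_eq (cs : List Char) :
    (PySem.List.pyRange 0 (PySem.Chars.len cs) 1).filter
      (fun i => decide (PySem.List.pyGetD cs i 'A' ≠ 'A')) = wIdx cs := by
  unfold wIdx
  rw [PySem.List.enumerate_eq_map_pyRange cs 'A', List.filter_map, List.map_map]
  simp [Function.comp_def, PySem.Chars.len]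

-- A's vertical loop sums vc over all characters (vc 'A' = 0)
theorem getE (cs : List Char) (q : Int × Char) (hq : q ∈ PySem.List.enumerate cs 0) :
    PySem.List.pyGetD cs q.1 'A' = q.2 := by
  rw [PySem.List.mem_enumerate_iff] at hq
  obtain ⟨k, hk, rfl⟩ := hq
  simp [PySem.List.pyGetD_natCast, List.getD_eq_getElem?_getD, hk]

theorem sum_filter_vc (l : List (Int × Char)) :
    ((l.filter (fun q => decide (q.2 ≠ 'A'))).map (fun q => vc q.2)).sum
      = (l.map (fun q => vc q.2)).sum := by
  induction l with
  | nil => rfl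
  | cons q t ih =>
    rw [List.filter_cons]
    by_cases h : q.2 = 'A'
    · rw [if_neg (by simp [h]), List.map_cons, List.sum_cons, ih, h]
      norm_num [vc]
      decide
    · rw [if_pos (by simp [h]), List.map_cons, List.map_cons, List.sum_cons, List.sum_cons, ih]

theorem vert_eq (cs : List Char) :
    (wIdx cs).foldl (fun ans wrong =>
      ans + min |((PySem.List.pyGetD cs wrong 'A').toNat : Int) - 65|
               (90 + 1 - ((PySem.List.pyGetD cs wrong 'A').toNat : Int))) 0
      = (cs.map vc).sum := by
  rw [PySem.List.foldl_add]
  unfold wIdx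
  rw [List.map_map]
  have hmap : ((PySem.List.enumerate cs 0).filter (fun q => decide (q.2 ≠ 'A'))).map
      ((fun wrong => min |((PySem.List.pyGetD cs wrong 'A').toNat : Int) - 65|
               (90 + 1 - ((PySem.List.pyGetD cs wrong 'A').toNat : Int))) ∘ (·.1))
      = ((PySem.List.enumerate cs 0).filter (fun q => decide (q.2 ≠ 'A'))).map (fun q => vc q.2) := by
    apply List.map_congr_left
    intro q hq
    have := getE cs q (List.mem_of_mem_filter hq)
    simp [Function.comp, this, vc]
  rw [hmap, sum_filter_vc]
  have := PySem.List.map_snd_enumerate cs (0:Int)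
  rw [show (fun q : Int × Char => vc q.2) = vc ∘ (·.2) from rfl, ← List.map_map, this]
  simp

-- B's vertical loop is the same sum
theorem vertB_eq (cs : List Char) :
    cs.foldl (fun a c => a + min |((c.toNat : Int)) - 65| (91 - (c.toNat : Int))) 0
      = (cs.map vc).sum := by
  rw [PySem.List.foldl_add, zero_add]
  rfl

-- A's index list is the cast of wrongsN
theorem wIdx_cast (cs : List Char) : wIdx cs = (wrongsN cs).map (Nat.cast) := by
  rw [← wIdx_eq]
  have h1 : PySem.Chars.len cs = ((cs.length : Nat) : Int) := by simp [PySem.Chars.len]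
  rw [h1, PySem.List.pyRange_zero_natCast, List.filter_map]
  unfold wrongsN
  congr 1
  apply List.filter_congr
  intro i _
  simp

-- A's horizontal index loop = fold of min over the pair candidates
theorem pyGetD_cons_shift {α : Type} (y : α) (L : List α) (j : Int) (hj : 0 ≤ j) (d : α) :
    PySem.List.pyGetD (y :: L) (j + 1) d = PySem.List.pyGetD L j d := by
  obtain ⟨m, rfl⟩ := Int.eq_ofNat_of_zero_le hj
  have h1 : ((m : Int) + 1) = ((m + 1 : Nat) : Int) := by push_cast; ring
  rw [h1, PySem.List.pyGetD_natCast, PySem.List.pyGetD_natCast]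
  simp

theorem foldRange_pcf (n : Int) (l : List Int) : ∀ (a init : Int),
    (PySem.List.pyRange 0 ((l.length : Int)) 1).foldl (fun sd index =>
        min (PySem.List.pyGetD (a :: l) index 0 +
              (n - PySem.List.pyGetD (a :: l) (index + 1) 0) +
             min (PySem.List.pyGetD (a :: l) index 0)
                 (n - PySem.List.pyGetD (a :: l) (index + 1) 0)) sd) init
      = (pcf n a l).foldl (fun sd c => min c sd) init := by
  induction l with
  | nil => intro a init; simp [pcf]
  | cons x xs ih =>
    intro a init
    have h0 : (0 : Int) < (((x :: xs).length : Int)) := by exact_mod_cast Nat.succ_pos xs.length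
    rw [PySem.List.pyRange_one_cons h0, List.foldl_cons]
    have e1 : PySem.List.pyGetD (a :: x :: xs) 0 0 = a := by
      simpa using PySem.List.pyGetD_natCast (a :: x :: xs) 0 0
    have e2 : PySem.List.pyGetD (a :: x :: xs) (0 + 1) 0 = x := by
      simpa using PySem.List.pyGetD_natCast (a :: x :: xs) 1 0
    rw [e1, e2]
    have hr1 : PySem.List.pyRange (0 + 1) (((x :: xs).length : Int)) 1
        = (PySem.List.pyRange 0 ((xs.length : Int)) 1).map (· + 1) := by
      rw [PySem.List.pyRange_one, PySem.List.pyRange_one, List.map_map]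
      have : (((x :: xs).length : Int) - (0 + 1)).toNat = ((xs.length : Int) - 0).toNat := by
        simp only [List.length_cons]; push_cast; omega
      rw [this]
      apply List.map_congr_left
      intro k _
      simp; ring
    rw [hr1, List.foldl_map]
    have hcong : (PySem.List.pyRange 0 ((xs.length : Int)) 1).foldl
        (fun sd index =>
          min (PySem.List.pyGetD (a :: x :: xs) (index + 1) 0 +
                (n - PySem.List.pyGetD (a :: x :: xs) (index + 1 + 1) 0) +
               min (PySem.List.pyGetD (a :: x :: xs) (index + 1) 0)
                   (n - PySem.List.pyGetD (a :: x :: xs) (index + 1 + 1) 0)) sd)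
        (min (a + (n - x) + min a (n - x)) init)
        = (PySem.List.pyRange 0 ((xs.length : Int)) 1).foldl
        (fun sd index =>
          min (PySem.List.pyGetD (x :: xs) index 0 +
                (n - PySem.List.pyGetD (x :: xs) (index + 1) 0) +
             min (PySem.List.pyGetD (x :: xs) index 0)
                 (n - PySem.List.pyGetD (x :: xs) (index + 1) 0)) sd)
        (min (a + (n - x) + min a (n - x)) init) := by
      apply PySem.List.foldl_congr_mem
      intro acc i hi
      have hi' : 0 ≤ i ∧ i < (xs.length : Int) :=
        (PySem.List.mem_pyRange_one (x := i) (a := 0) (b := (xs.length : Int))).mp hi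
      have hi1 : (0:Int) ≤ i + 1 := by omega
      rw [pyGetD_cons_shift a (x :: xs) (i + 1) hi1 0, pyGetD_cons_shift a (x :: xs) i hi'.1 0]
    rw [hcong]
    rw [ih x (min (a + (n - x) + min a (n - x)) init)]
    rfl

theorem lastD_cons (y d : Int) (ys : List Int) : lastD (y :: ys) d = lastD ys y := by
  rcases ys with _ | ⟨h, t⟩
  · simp [lastD]
  · have hs : (h :: t).getLast?.isSome := by simp [List.getLast?_isSome]
    obtain ⟨a, ha⟩ := Option.isSome_iff_exists.mp hs
    simp [lastD, List.getLast?_cons_cons, ha]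

theorem pyGetD_neg_one (l : List Int) (h : l ≠ []) (d : Int) :
    PySem.List.pyGetD l (-1) d = lastD l d := by
  have hl : 1 ≤ l.length := List.length_pos_of_ne_nil h
  simp [PySem.List.pyGetD, PySem.List.pyGet?, PySem.List.pyIdx?, hl, lastD,
        List.getLast?_eq_getElem?]

theorem foldl_min_flip (cl : List Int) (a : Int) :
    cl.foldl (fun sd c => min c sd) a = cl.foldl min a := by
  induction cl generalizing a with
  | nil => rfl
  | cons c t ih => rw [List.foldl_cons, List.foldl_cons, min_comm, ih]

theorem foldl_min_init (cl : List Int) (a b : Int) :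
    cl.foldl min (min a b) = min a (cl.foldl min b) := by
  induction cl generalizing b with
  | nil => rfl
  | cons c t ih => rw [List.foldl_cons, List.foldl_cons, min_assoc, ih]

-- min-fold toolbox
theorem minf_le_init (l : List Int) (b : Int) : l.foldl min b ≤ b := by
  induction l generalizing b with
  | nil => simp
  | cons x t ih => exact le_trans (ih (min b x)) (min_le_left b x)

theorem minf_le_mem (l : List Int) (b a : Int) (h : a ∈ l) : l.foldl min b ≤ a := by
  induction l generalizing b with
  | nil => simp at h
  | cons x t ih =>
    rcases List.mem_cons.mp h with rfl | h'
    · exact le_trans (minf_le_init t (min b a)) (min_le_right b a)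
    · exact ih (min b x) h'

theorem le_minf (l : List Int) (b c : Int) (hb : c ≤ b) (h : ∀ a ∈ l, c ≤ a) :
    c ≤ l.foldl min b := by
  induction l generalizing b with
  | nil => simpa
  | cons x t ih =>
    exact ih (min b x) (le_min hb (h x List.mem_cons_self)) (fun a ha => h a (List.mem_cons_of_mem x ha))

-- wrongsN facts
theorem mem_wrongsN (cs : List Char) (i : Nat) :
    i ∈ wrongsN cs ↔ i < cs.length ∧ cs.getD i 'A' ≠ 'A' := by
  simp [wrongsN, List.mem_filter]

theorem wrongsN_sorted (cs : List Char) : (wrongsN cs).Pairwise (· < ·) :=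
  List.Pairwise.sublist List.filter_sublist List.pairwise_lt_range

-- D's wrong-letter count is the length of the wrong-index list
theorem countP_wrongs (cs : List Char) :
    cs.countP (fun c => c != 'A') = (wrongsN cs).length := by
  have h1 : (wrongsN cs).length = (wIdx cs).length := by rw [wIdx_cast]; simp
  rw [h1]
  unfold wIdx
  rw [List.length_map, ← List.countP_eq_length_filter]
  conv_lhs => rw [← PySem.List.map_snd_enumerate cs (0 : Int), List.countP_map]
  apply List.countP_congr
  intro q _
  simp [Function.comp, bne]

theorem getD_ne_lt (cs : List Char) (i : Nat) (h : cs.getD i 'A' ≠ 'A') : i < cs.length := by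
  by_contra hc
  exact h (List.getD_eq_default cs 'A' (by omega))

theorem mem_wrongsN' (cs : List Char) (i : Nat) : i ∈ wrongsN cs ↔ cs.getD i 'A' ≠ 'A' :=
  ⟨fun h => ((mem_wrongsN cs i).mp h).2,
   fun h => (mem_wrongsN cs i).mpr ⟨getD_ne_lt cs i h, h⟩⟩

-- any decomposition of a Pairwise(<) list pins every member's position
theorem between_A (cs : List Char) (u v : List Nat) (a b : Nat)
    (hw : wrongsN cs = u ++ a :: b :: v) :
    ∀ t, a < t → t < b → cs.getD t 'A' = 'A' := by
  intro t hta htb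
  by_contra h
  have hb : b ∈ wrongsN cs := by rw [hw]; simp
  have hblen : b < cs.length := ((mem_wrongsN cs b).mp hb).1
  have ht : t ∈ wrongsN cs := (mem_wrongsN cs t).mpr ⟨by omega, h⟩
  have hs := wrongsN_sorted cs
  rw [hw] at ht hs
  rw [List.pairwise_append] at hs
  rcases List.mem_append.mp ht with hu | hc
  · have := hs.2.2 t hu a (by simp)
    omega
  · have hp := hs.2.1
    rw [List.pairwise_cons] at hp
    have hp2 := hp.2
    rw [List.pairwise_cons] at hp2
    rcases List.mem_cons.mp hc with rfl | hc2
    · omega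
    rcases List.mem_cons.mp hc2 with rfl | hv
    · omega
    have := hp2.1 t hv
    omega

theorem after_A (cs : List Char) (u : List Nat) (a : Nat)
    (hw : wrongsN cs = u ++ [a]) :
    ∀ t, a < t → t < cs.length → cs.getD t 'A' = 'A' := by
  intro t hta htl
  by_contra h
  have ht : t ∈ wrongsN cs := (mem_wrongsN cs t).mpr ⟨htl, h⟩
  have hs := wrongsN_sorted cs
  rw [hw] at ht hs
  rw [List.pairwise_append] at hs
  rcases List.mem_append.mp ht with hu | hc
  · have := hs.2.2 t hu a (by simp)
    omega
  · rcases List.mem_cons.mp hc with rfl | hc2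
    · omega
    · simp at hc2

theorem before_A (cs : List Char) (v : List Nat) (a : Nat)
    (hw : wrongsN cs = a :: v) :
    ∀ t, t < a → cs.getD t 'A' = 'A' := by
  intro t hta
  by_contra h
  have ha : a ∈ wrongsN cs := by rw [hw]; simp
  have ht : t ∈ wrongsN cs := (mem_wrongsN cs t).mpr ⟨by
      have := ((mem_wrongsN cs a).mp ha).1; omega, h⟩
  have hs := wrongsN_sorted cs
  rw [hw] at ht hs
  rw [List.pairwise_cons] at hs
  rcases List.mem_cons.mp ht with rfl | hv
  · omega
  · have := hs.1 t hv
    omega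

-- nxtLoop finds the first index ≥ j that is past the string or not 'A'
theorem nxtLoop_spec (cs : List Char) (j r : Nat) (hjr : j ≤ r)
    (hall : ∀ t, j ≤ t → t < r → cs.getD t 'A' = 'A')
    (hr : r = cs.length ∨ (r < cs.length ∧ cs.getD r 'A' ≠ 'A')) :
    nxtLoop cs j = r := by
  have hrl : r ≤ cs.length := by rcases hr with rfl | ⟨h, _⟩ <;> omega
  have main : ∀ (fuel j : Nat), j ≤ r → r ≤ j + fuel →
      (∀ t, j ≤ t → t < r → cs.getD t 'A' = 'A') → nxtGo cs fuel j = r := by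
    intro fuel
    induction fuel with
    | zero =>
      intro j h1 h2 _
      have : j = r := by omega
      simpa [nxtGo] using this
    | succ f ih =>
      intro j h1 h2 hall
      by_cases hjr : j = r
      · subst hjr
        rcases hr with h | ⟨h3, h4⟩
        · simp [nxtGo, h]
        · show (if j < cs.length then (if cs.getD j 'A' = 'A' then nxtGo cs f (j + 1) else j) else j) = j
          rw [if_pos h3, if_neg h4]
      · have hjr' : j < r := by omega
        have hA := hall j le_rfl hjr'
        have hjlen : j < cs.length := by omega
        show (if j < cs.length then (if cs.getD j 'A' = 'A' then nxtGo cs f (j + 1) else j) else j) = r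
        rw [if_pos hjlen, if_pos hA]
        exact ih (j + 1) (by omega) (by omega) (fun t ht1 ht2 => hall t (by omega) ht2)
  exact main (cs.length - j) j hjr (by omega) hall

-- bounds and contents of the nxtLoop scan
theorem nxtGo_le (cs : List Char) : ∀ (fuel j : Nat), j ≤ cs.length → nxtGo cs fuel j ≤ cs.length := by
  intro fuel
  induction fuel with
  | zero => intro j h; exact h
  | succ f ih =>
    intro j h
    show (if j < cs.length then (if cs.getD j 'A' = 'A' then nxtGo cs f (j + 1) else j) else j) ≤ cs.length
    split_ifs with h1 h2
    · exact ih (j + 1) (by omega)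
    · omega
    · omega

theorem nxtLoop_le (cs : List Char) (j : Nat) (h : j ≤ cs.length) : nxtLoop cs j ≤ cs.length :=
  nxtGo_le cs _ j h

theorem nxtGo_ge_self (cs : List Char) : ∀ (fuel j : Nat), j ≤ nxtGo cs fuel j := by
  intro fuel
  induction fuel with
  | zero => intro j; exact le_rfl
  | succ f ih =>
    intro j
    show j ≤ (if j < cs.length then (if cs.getD j 'A' = 'A' then nxtGo cs f (j + 1) else j) else j)
    split_ifs with h1 h2
    · exact le_trans (by omega) (ih (j + 1))
    · exact le_rfl
    · exact le_rfl

theorem nxtLoop_ge_self (cs : List Char) (j : Nat) : j ≤ nxtLoop cs j :=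
  nxtGo_ge_self cs _ j

theorem nxtLoop_ge (cs : List Char) (j q : Nat) (hq : q ≤ cs.length)
    (hall : ∀ t, j ≤ t → t < q → cs.getD t 'A' = 'A') : q ≤ nxtLoop cs j := by
  have main : ∀ (fuel j : Nat), cs.length ≤ j + fuel →
      (∀ t, j ≤ t → t < q → cs.getD t 'A' = 'A') → q ≤ nxtGo cs fuel j := by
    intro fuel
    induction fuel with
    | zero => intro j h _; show q ≤ j; omega
    | succ f ih =>
      intro j h hall'
      by_cases hjq : q ≤ j
      · exact le_trans hjq (nxtGo_ge_self cs _ j)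
      · have hjlen : j < cs.length := by omega
        have hA : cs.getD j 'A' = 'A' := hall' j le_rfl (by omega)
        show q ≤ (if j < cs.length then
            (if cs.getD j 'A' = 'A' then nxtGo cs f (j + 1) else j) else j)
        rw [if_pos hjlen, if_pos hA]
        exact ih (j + 1) (by omega) (fun t ht1 ht2 => hall' t (by omega) ht2)
  exact main (cs.length - j) j (by omega) hall

theorem nxtLoop_allA (cs : List Char) (j : Nat) :
    ∀ t, j ≤ t → t < nxtLoop cs j → cs.getD t 'A' = 'A' := by
  have main : ∀ (fuel j t : Nat), j ≤ t → t < nxtGo cs fuel j → cs.getD t 'A' = 'A' := by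
    intro fuel
    induction fuel with
    | zero =>
      intro j t h1 h2
      rw [show nxtGo cs 0 j = j from rfl] at h2
      omega
    | succ f ih =>
      intro j t h1 h2
      rw [show nxtGo cs (f + 1) j = (if j < cs.length then
          (if cs.getD j 'A' = 'A' then nxtGo cs f (j + 1) else j) else j) from rfl] at h2
      split_ifs at h2 with hl hA
      · rcases Nat.eq_or_lt_of_le h1 with rfl | h1'
        · exact hA
        · exact ih (j + 1) t h1' h2
      · omega
      · omega
  exact main (cs.length - j) j

-- the first wrong position is D's findIdx
theorem findIdx_first (cs : List Char) (v : List Nat) (a : Nat) (hW : wrongsN cs = a :: v) :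
    cs.findIdx (fun c => c != 'A') = a := by
  have ham := (mem_wrongsN cs a).mp (by rw [hW]; simp)
  rw [List.findIdx_eq ham.1]
  constructor
  · have := ham.2
    rw [List.getD_eq_getElem _ _ ham.1] at this
    simpa using this
  · intro j hj
    have hA := before_A cs v a hW j hj
    rw [List.getD_eq_getElem _ _ (by omega)] at hA
    simp [hA]

-- fCand at the distinguished positions
theorem fCand_adj (cs : List Char) (u v : List Nat) (a b : Nat)
    (hw : wrongsN cs = u ++ a :: b :: v) :
    fCand cs a = (a : Int) + ((cs.length : Int) - b) + min (a : Int) ((cs.length : Int) - b) := by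
  have hb : b ∈ wrongsN cs := by rw [hw]; simp
  have hbm := (mem_wrongsN cs b).mp hb
  have hs := wrongsN_sorted cs
  rw [hw, List.pairwise_append, List.pairwise_cons] at hs
  have hab : a < b := hs.2.1.1 b (by simp)
  have hnxt : nxtLoop cs (a + 1) = b :=
    nxtLoop_spec cs (a + 1) b (by omega)
      (fun t ht1 ht2 => between_A cs u v a b hw t (by omega) ht2)
      (Or.inr ⟨hbm.1, hbm.2⟩)
  simp [fCand, hnxt]

theorem fCand_last (cs : List Char) (u : List Nat) (a : Nat)
    (hw : wrongsN cs = u ++ [a]) : fCand cs a = a := by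
  have ha : a ∈ wrongsN cs := by rw [hw]; simp
  have ham := (mem_wrongsN cs a).mp ha
  have hnxt : nxtLoop cs (a + 1) = cs.length :=
    nxtLoop_spec cs (a + 1) cs.length (by omega)
      (fun t ht1 ht2 => after_A cs u a hw t (by omega) ht2)
      (Or.inl rfl)
  simp only [fCand, hnxt]
  rw [sub_self, min_eq_right (Int.natCast_nonneg a)]
  ring

theorem fCand_zero (cs : List Char) (v : List Nat) (a : Nat)
    (hw : wrongsN cs = a :: v) (ha : 0 < a) :
    fCand cs 0 = (cs.length : Int) - a := by
  have ham := (mem_wrongsN cs a).mp (by rw [hw]; simp)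
  have hnxt : nxtLoop cs (0 + 1) = a :=
    nxtLoop_spec cs 1 a (by omega)
      (fun t ht1 ht2 => before_A cs v a hw t ht2)
      (Or.inr ⟨ham.1, ham.2⟩)
  simp only [fCand, hnxt]
  rw [min_eq_left (by
    have : (a : Int) ≤ (cs.length : Int) := by exact_mod_cast le_of_lt ham.1
    push_cast
    omega)]
  push_cast
  ring

theorem fCand_allA (cs : List Char) (hw : wrongsN cs = []) (i : Nat) (hi : i < cs.length) :
    fCand cs i = i := by
  have hnxt : nxtLoop cs (i + 1) = cs.length :=
    nxtLoop_spec cs (i + 1) cs.length (by omega)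
      (fun t ht1 ht2 => by
        by_contra h
        have ht : t ∈ wrongsN cs := (mem_wrongsN cs t).mpr ⟨ht2, h⟩
        rw [hw] at ht
        simp at ht)
      (Or.inl rfl)
  simp only [fCand, hnxt]
  rw [sub_self, min_eq_right (Int.natCast_nonneg i)]
  ring

-- the same candidate values from quantified characterizations of the positions
-- the first wrong position is unique
-- every candidate is dominated by one at position 0 or at a wrong position
theorem fCand_dominate (cs : List Char) (i : Nat) (hi : i < cs.length) :
    ∃ s, s ≤ i ∧ (s = 0 ∨ s ∈ wrongsN cs) ∧ fCand cs s ≤ fCand cs i := by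
  induction i with
  | zero => exact ⟨0, le_rfl, Or.inl rfl, le_rfl⟩
  | succ k ih =>
    by_cases hw : (k + 1) ∈ wrongsN cs
    · exact ⟨k + 1, le_rfl, Or.inr hw, le_rfl⟩
    · have hA : cs.getD (k + 1) 'A' = 'A' := by
        by_contra h
        exact hw ((mem_wrongsN _ _).mpr ⟨hi, h⟩)
      have hstep : nxtLoop cs (k + 1) = nxtLoop cs (k + 1 + 1) := by
        unfold nxtLoop
        rw [show cs.length - (k + 1) = (cs.length - (k + 1 + 1)) + 1 from by omega]
        show (if k + 1 < cs.length then
            (if cs.getD (k + 1) 'A' = 'A' then nxtGo cs (cs.length - (k + 1 + 1)) (k + 1 + 1)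
             else k + 1) else k + 1) = _
        rw [if_pos hi, if_pos hA]
      have hle : fCand cs k ≤ fCand cs (k + 1) := by
        simp only [fCand, hstep]
        have h1 : (k : Int) ≤ ((k + 1 : Nat) : Int) := by push_cast; omega
        exact add_le_add (add_le_add h1 le_rfl) (min_le_min h1 le_rfl)
      obtain ⟨s, h1, h2, h3⟩ := ih (by omega)
      exact ⟨s, by omega, h2, le_trans h3 hle⟩

-- A's pair-candidate list is the fCand image of the wrong list minus its last element
theorem pcf_eq (cs : List Char) : ∀ (rest : List Nat) (a : Nat) (u : List Nat),
    wrongsN cs = u ++ a :: rest →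
    pcf (cs.length : Int) (a : Int) (rest.map Nat.cast)
      = ((a :: rest).dropLast).map (fun w => fCand cs w) := by
  intro rest
  induction rest with
  | nil => intro a u hw; simp [pcf]
  | cons x xs ih =>
    intro a u hw
    have hadj := fCand_adj cs u xs a x hw
    show ((a : Int) + ((cs.length : Int) - x) + min (a : Int) ((cs.length : Int) - x))
        :: pcf (cs.length : Int) (x : Int) (xs.map Nat.cast)
      = ((a :: x :: xs).dropLast).map (fun w => fCand cs w)
    rw [List.dropLast_cons₂, List.map_cons]
    congr 1
    · exact hadj.symm
    · exact ih x (u ++ [a]) (by rw [hw]; simp)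

-- absorbing a small initial value into a larger one
theorem minf_absorb (l : List Int) (x b : Int) (hxb : x ≤ b) :
    l.foldl min x = min (l.foldl min b) x := by
  apply le_antisymm
  · exact le_min
      (le_minf l b _ (le_trans (minf_le_init l x) hxb) (fun a ha => minf_le_mem l x a ha))
      (minf_le_init l x)
  · exact le_minf l x _ (min_le_right _ _)
      (fun a ha => le_trans (min_le_left _ _) (minf_le_mem l b a ha))

theorem lastD_cast (l : List Nat) (d : Nat) :
    lastD (l.map (Nat.cast)) ((d : Nat) : Int) = ((l.getLastD d : Nat) : Int) := by
  simp [lastD, List.getLast?_map, Option.getD_map, List.getLastD_eq_getLast?]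

theorem getLastD_mem (l : List Nat) (d : Nat) (h : l ≠ []) : l.getLastD d ∈ l := by
  rw [List.getLastD_eq_getLast?]
  have hs : l.getLast?.isSome := by simp [List.getLast?_isSome, h]
  obtain ⟨a, ha⟩ := Option.isSome_iff_exists.mp hs
  rw [ha, Option.getD_some]
  exact List.mem_of_getLast? ha

theorem sum_vc_zero (cs : List Char) (hw : wrongsN cs = []) : (cs.map vc).sum = 0 := by
  apply List.sum_eq_zero
  intro y hy
  obtain ⟨c, hc, rfl⟩ := List.mem_map.mp hy
  obtain ⟨i, hi, rfl⟩ := List.mem_iff_getElem.mp hc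
  have hA : cs.getD i 'A' = 'A' := by
    by_contra h
    have ht : i ∈ wrongsN cs := (mem_wrongsN cs i).mpr ⟨hi, h⟩
    rw [hw] at ht
    simp at ht
  rw [List.getD_eq_getElem _ _ hi] at hA
  rw [hA]
  decide

-- B's value in closed form
theorem B_eq (name : String) :
    solution_alt name = (name.toList.map vc).sum +
      ((List.range name.toList.length).map (fCand name.toList)).foldl min
        (3 * (name.toList.length : Int)) := by
  simp only [solution_alt]
  rw [List.foldl_map]
  congr 1
  exact vertB_eq name.toList

-- B's scan over all positions collapses to position 0 and the wrong positions
theorem range_fold_min (cs : List Char) (hm : 0 < cs.length) :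
    ((List.range cs.length).map (fCand cs)).foldl min (3 * (cs.length : Int))
      = min (fCand cs 0)
          (((wrongsN cs).map (fCand cs)).foldl min (3 * (cs.length : Int))) := by
  have key : ((List.range cs.length).map (fCand cs)).foldl min (3 * (cs.length : Int))
      = ((0 :: wrongsN cs).map (fCand cs)).foldl min (3 * (cs.length : Int)) := by
    apply le_antisymm
    · apply le_minf
      · exact minf_le_init _ _
      · intro y hy
        obtain ⟨s, hs, rfl⟩ := List.mem_map.mp hy
        apply minf_le_mem
        apply List.mem_map_of_mem
        rw [List.mem_range]
        rcases List.mem_cons.mp hs with rfl | hsw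
        · exact hm
        · exact ((mem_wrongsN cs s).mp hsw).1
    · apply le_minf
      · exact minf_le_init _ _
      · intro y hy
        obtain ⟨i, hi, rfl⟩ := List.mem_map.mp hy
        rw [List.mem_range] at hi
        obtain ⟨s, _, hs2, hs3⟩ := fCand_dominate cs i hi
        refine le_trans (minf_le_mem _ _ (fCand cs s) ?_) hs3
        apply List.mem_map_of_mem
        rcases hs2 with rfl | h
        · exact List.mem_cons_self
        · exact List.mem_cons_of_mem _ h
  rw [key, List.map_cons, List.foldl_cons, min_comm (3 * _) _, foldl_min_init]

-- A's value when there is no wrong letter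
theorem A_case0 (name : String) (hW : wrongsN name.toList = []) : solution name = 0 := by
  simp only [solution]
  rw [wIdx_eq, wIdx_cast, hW]
  simp

-- A's value with exactly one wrong letter
theorem A_case1 (name : String) (w : Nat) (hW : wrongsN name.toList = [w]) :
    solution name = (name.toList.map vc).sum
      + min (w : Int) ((name.toList.length : Int) - w) := by
  simp only [solution]
  rw [wIdx_eq, vert_eq, wIdx_cast, hW]
  rw [if_neg (by simp), if_pos (by simp)]
  simp only [List.map_cons, List.map_nil]
  rw [PySem.List.pyGetD_zero_cons]
  have hn : PySem.Chars.len name.toList = ((name.toList.length : Nat) : Int) := by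
    simp [PySem.Chars.len]
  rw [hn]

-- A's value with at least two wrong letters: the min-fold of fCand over the wrong list
theorem A_case2 (name : String) (a x : Nat) (xs : List Nat)
    (hW : wrongsN name.toList = a :: x :: xs) :
    solution name = (name.toList.map vc).sum +
      ((wrongsN name.toList).map (fCand name.toList)).foldl min
        (3 * (name.toList.length : Int)) := by
  have hn : PySem.Chars.len name.toList = ((name.toList.length : Nat) : Int) := by
    simp [PySem.Chars.len]
  simp only [solution]
  rw [wIdx_eq, vert_eq, wIdx_cast, hW]
  rw [if_pos (by simp)]
  rw [List.map_cons, List.map_cons]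
  congr 1
  -- the shortest-distance loop
  set cs := name.toList with hcs
  set l : List Int := ((x : Nat) : Int) :: xs.map (Nat.cast) with hl
  have hlen : ((((a : Nat) : Int) :: l).length : Int) - 1 = ((l.length : Int)) := by
    simp [hl]
  rw [hlen, pyGetD_neg_one _ (by simp) 0, lastD_cons, foldRange_pcf, foldl_min_flip]
  have hlx : l = (x :: xs).map (Nat.cast) := by simp [hl]
  set wl : Nat := (x :: xs).getLastD a with hwl
  have hlast : lastD l ((a : Nat) : Int) = ((wl : Nat) : Int) := by
    rw [hlx, lastD_cast]
  have hWne : wrongsN cs ≠ [] := by rw [hW]; simp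
  have hgl : (wrongsN cs).getLast hWne = wl := by
    have h2 : (wrongsN cs).getLast? = some ((wrongsN cs).getLast hWne) :=
      List.getLast?_eq_some_getLast hWne
    have h3 : (wrongsN cs).getLastD 0 = (wrongsN cs).getLast hWne := by
      rw [List.getLastD_eq_getLast?, h2, Option.getD_some]
    rw [← h3, hW, List.getLastD_cons]
  have hdecomp : wrongsN cs = (wrongsN cs).dropLast ++ [wl] := by
    rw [← hgl]
    exact (List.dropLast_append_getLast hWne).symm
  have hfwl : fCand cs wl = ((wl : Nat) : Int) := fCand_last cs ((wrongsN cs).dropLast) wl hdecomp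
  have hwlmem : wl ∈ wrongsN cs := by
    rw [hW]
    exact List.mem_cons_of_mem a (getLastD_mem (x :: xs) a (by simp))
  have hwllt : wl < cs.length := ((mem_wrongsN cs wl).mp hwlmem).1
  have hpcf : pcf (PySem.Chars.len cs) ((a : Nat) : Int) l
      = ((wrongsN cs).dropLast).map (fCand cs) := by
    rw [hn, hlx, pcf_eq cs (x :: xs) a [] (by rw [hW]; rfl), hW]
  rw [hlast, hpcf]
  rw [minf_absorb _ _ (3 * ((cs.length : Nat) : Int)) (by push_cast; omega)]
  rw [← hfwl]
  -- fold over W = dropLast ++ [wl]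
  rw [show (a :: x :: xs).map (fCand cs) = ((wrongsN cs).dropLast).map (fCand cs)
        ++ [fCand cs wl] from by
        rw [show [fCand cs wl] = List.map (fCand cs) [wl] from rfl,
            ← List.map_append, ← hdecomp, hW]]
  rw [List.foldl_append]
  rfl

-- the last wrong position: its candidate is itself
-- ===== VERDICT (by name: the statement is the Claim_ definition above) =====
theorem solution_spec : Claim_unchanged_solution := by
  unfold Claim_unchanged_solution
  intro name _
  unfold Spec_solution
  intro hnD
  rcases hW : wrongsN name.toList with _ | ⟨a, rest⟩
  · -- no wrong letter: both sides are the vertical sum (= 0)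
    rw [A_case0 name hW, B_eq name, sum_vc_zero name.toList hW, zero_add]
    rcases Nat.eq_zero_or_pos name.toList.length with hm | hm
    · rw [hm]; simp
    · symm
      apply le_antisymm
      · have hmem : fCand name.toList 0 ∈ (List.range name.toList.length).map (fCand name.toList) :=
          List.mem_map_of_mem (List.mem_range.mpr hm)
        calc ((List.range name.toList.length).map (fCand name.toList)).foldl min
              (3 * (name.toList.length : Int)) ≤ fCand name.toList 0 := minf_le_mem _ _ _ hmem
          _ = ((0:Nat):Int) := fCand_allA name.toList hW 0 hm
          _ = 0 := by simp
      · apply le_minf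
        · positivity
        · intro y hy
          obtain ⟨i, hi, rfl⟩ := List.mem_map.mp hy
          rw [List.mem_range] at hi
          rw [fCand_allA name.toList hW i hi]
          positivity
  rcases rest with _ | ⟨x, xs⟩
  · -- exactly one wrong letter
    have ham := (mem_wrongsN name.toList a).mp (by rw [hW]; simp)
    have hm : 0 < name.toList.length := by omega
    rw [A_case1 name a hW, B_eq name, range_fold_min name.toList hm, hW]
    congr 1
    have hfa : fCand name.toList a = ((a : Nat) : Int) :=
      fCand_last name.toList [] a (by rw [hW]; rfl)
    rw [List.map_cons, List.map_nil]
    rw [show List.foldl min (3 * (name.toList.length : Int)) [fCand name.toList a]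
          = min (3 * (name.toList.length : Int)) (fCand name.toList a) from rfl, hfa]
    rcases Nat.eq_zero_or_pos a with ha0 | ha0
    · subst ha0
      rw [show fCand name.toList 0 = ((0:Nat):Int) from hfa]
      have hca : ((name.toList.length : Nat) : Int) ≥ 1 := by push_cast; omega
      omega
    · rw [fCand_zero name.toList [] a hW ha0]
      have hca : ((a : Nat) : Int) < ((name.toList.length : Nat) : Int) := by
        push_cast; omega
      omega
  · -- at least two wrong letters
    have ham := (mem_wrongsN name.toList a).mp (by rw [hW]; simp)
    have hm : 0 < name.toList.length := by omega
    rw [A_case2 name a x xs hW, B_eq name, range_fold_min name.toList hm]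
    congr 1
    have hle : ((wrongsN name.toList).map (fCand name.toList)).foldl min
        (3 * (name.toList.length : Int)) ≤ fCand name.toList 0 := by
      by_cases ha0 : a = 0
      · subst ha0
        exact minf_le_mem _ _ _
          (List.mem_map_of_mem (by rw [hW]; exact List.mem_cons_self))
      · have hf0 : fCand name.toList 0 = (name.toList.length : Int) - a :=
          fCand_zero name.toList (x :: xs) a hW (by omega)
        have hfi : name.toList.findIdx (fun c => c != 'A') = a :=
          findIdx_first name.toList (x :: xs) a hW
        have hC1 : 2 ≤ name.toList.countP (fun c => c != 'A') := by
          rw [countP_wrongs, hW]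
          simp
        have hMf : ¬ (∀ p < name.toList.length, ∀ q ≤ name.toList.length,
            (p < q ∧ name.toList.getD p 'A' ≠ 'A' ∧
              ∀ t < q, p < t → name.toList.getD t 'A' = 'A') →
            name.toList.length - name.toList.findIdx (fun c => c != 'A')
              < p + (name.toList.length - q) + min p (name.toList.length - q)) :=
          fun h => hnD ⟨before_A name.toList (x :: xs) a hW 0 (by omega), hC1, h⟩
        push_neg at hMf
        obtain ⟨p, hpm, q, hqm, ⟨hpq, hPp, hbet⟩, hle⟩ := hMf
        rw [hfi] at hle
        rw [hf0]
        calc ((wrongsN name.toList).map (fCand name.toList)).foldl min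
              (3 * (name.toList.length : Int))
            ≤ fCand name.toList p :=
              minf_le_mem _ _ _ (List.mem_map_of_mem ((mem_wrongsN' _ _).mpr hPp))
          _ ≤ (name.toList.length : Int) - a := by
              have hq_le : q ≤ nxtLoop name.toList (p + 1) :=
                nxtLoop_ge name.toList (p + 1) q hqm
                  (fun t ht1 ht2 => hbet t ht2 (by omega))
              have hnle : nxtLoop name.toList (p + 1) ≤ name.toList.length :=
                nxtLoop_le name.toList (p + 1) (by omega)
              simp only [fCand]
              omega
    rw [min_eq_right hle]

theorem solution_changed : Claim_changed_solution := by
  unfold Claim_changed_solution; decide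

theorem solution_tight : Claim_exact_solution := by
  unfold Claim_exact_solution
  intro name _ hD
  obtain ⟨-, hC1, H⟩ := hD
  rw [countP_wrongs] at hC1
  rcases hW : wrongsN name.toList with _ | ⟨a, _ | ⟨x, xs⟩⟩
  · rw [hW] at hC1; simp at hC1
  · rw [hW] at hC1; simp at hC1
  · have ham := (mem_wrongsN name.toList a).mp (by rw [hW]; simp)
    have hm : 0 < name.toList.length := by omega
    have hfi : name.toList.findIdx (fun c => c != 'A') = a :=
      findIdx_first name.toList (x :: xs) a hW
    rw [hfi] at H
    -- every wrong position's candidate is strictly above the left sweep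
    have hcand : ∀ v, v ∈ wrongsN name.toList →
        (name.toList.length : Int) - a + 1 ≤ fCand name.toList v := by
      intro v hvmem
      have hPv := (mem_wrongsN' _ _).mp hvmem
      have hvm : v < name.toList.length := ((mem_wrongsN _ _).mp hvmem).1
      have hnle : nxtLoop name.toList (v + 1) ≤ name.toList.length :=
        nxtLoop_le name.toList (v + 1) (by omega)
      have hge : v + 1 ≤ nxtLoop name.toList (v + 1) := nxtLoop_ge_self name.toList (v + 1)
      have hDv := H v hvm (nxtLoop name.toList (v + 1)) hnle
        ⟨by omega, hPv, fun t ht1 ht2 => nxtLoop_allA name.toList (v + 1) t (by omega) ht1⟩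
      simp only [fCand]
      omega
    have ha0 : 0 < a := by
      by_contra h0
      have hca := hcand a (by rw [hW]; exact List.mem_cons_self)
      have hfa : fCand name.toList a
          = (a : Int) + ((name.toList.length : Int) - nxtLoop name.toList (a + 1))
            + min (a : Int) ((name.toList.length : Int) - nxtLoop name.toList (a + 1)) := rfl
      have hnle : nxtLoop name.toList (a + 1) ≤ name.toList.length :=
        nxtLoop_le name.toList (a + 1) (by omega)
      rw [hfa] at hca
      omega
    have hf0 : fCand name.toList 0 = (name.toList.length : Int) - a :=
      fCand_zero name.toList (x :: xs) a hW ha0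
    have hlt : (name.toList.length : Int) - a
        < ((wrongsN name.toList).map (fCand name.toList)).foldl min
            (3 * (name.toList.length : Int)) := by
      have hstep : (name.toList.length : Int) - a + 1
          ≤ ((wrongsN name.toList).map (fCand name.toList)).foldl min
              (3 * (name.toList.length : Int)) := by
        apply le_minf
        · have h1 : ((a : Nat) : Int) < ((name.toList.length : Nat) : Int) := by
            push_cast; omega
          have h2 : (1 : Int) ≤ ((a : Nat) : Int) := by push_cast; omega
          omega
        · intro y hy
          obtain ⟨v, hvmem, rfl⟩ := List.mem_map.mp hy
          exact hcand v hvmem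
      omega
    rw [A_case2 name a x xs hW, B_eq name, range_fold_min name.toList hm, hf0]
    intro heq
    have habs : min ((name.toList.length : Int) - a)
        (((wrongsN name.toList).map (fCand name.toList)).foldl min
          (3 * (name.toList.length : Int)))
        = (name.toList.length : Int) - a := min_eq_left (le_of_lt hlt)
    rw [habs] at heq
    omega
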